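-- pv_equiv track=rewrite | github.com/JuanPabloCB/minka_app | app/services/orchestrator_turn_service.py | _focus_question_already_asked
-- ===== SOURCE A (Python) =====
-- def _focus_question_already_asked(history_messages: list[dict[str, str]]) -> bool:
--     """
--     Detecta si el bot ya preguntó por énfasis/prioridades (focus) en esta sesión.
--     Lo hacemos por texto para no tocar DB.
--     """
--     needles = (
--         "énfasis",
--         "enfasis",
--         "aspecto específico",
--         "aspecto especifico",
--         "prioridad",
--         "prioridades",
--         "algo en lo que",
--         "algo específico",
--         "algo especifico",
--     )
--     for m in reversed(history_messages):
--         if m.get("role") != "assistant":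
--             continue
--         txt = (m.get("content") or "").lower()
--         if any(n in txt for n in needles):
--             return True
--     return False
-- ===== SOURCE B (Python) =====
-- def _focus_question_already_asked(history_messages: list[dict[str, str]]) -> bool:
--     needles = (
--         "énfasis",
--         "enfasis",
--         "aspecto específico",
--         "aspecto especifico",
--         "prioridad",
--         "prioridades",
--         "algo en lo que",
--         "algo específico",
--         "algo especifico",
--     )
--     texts = [(m.get("content") or "").lower()
--              for m in history_messages
--              if m.get("role") == "assistant"]
--     combined = "\n".join(texts)
--     return any(n in combined for n in needles)
-- ===== Notes on version B (the rewrite author's own statement) =====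
-- stated objective: alternative
-- what changed: B replaces A's early-return reverse walk with per-message needle tests by a gather-then-scan decomposition: collect all lowered assistant contents, join them with a newline, and run the needle scan once over the combined text.
import Mathlib
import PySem

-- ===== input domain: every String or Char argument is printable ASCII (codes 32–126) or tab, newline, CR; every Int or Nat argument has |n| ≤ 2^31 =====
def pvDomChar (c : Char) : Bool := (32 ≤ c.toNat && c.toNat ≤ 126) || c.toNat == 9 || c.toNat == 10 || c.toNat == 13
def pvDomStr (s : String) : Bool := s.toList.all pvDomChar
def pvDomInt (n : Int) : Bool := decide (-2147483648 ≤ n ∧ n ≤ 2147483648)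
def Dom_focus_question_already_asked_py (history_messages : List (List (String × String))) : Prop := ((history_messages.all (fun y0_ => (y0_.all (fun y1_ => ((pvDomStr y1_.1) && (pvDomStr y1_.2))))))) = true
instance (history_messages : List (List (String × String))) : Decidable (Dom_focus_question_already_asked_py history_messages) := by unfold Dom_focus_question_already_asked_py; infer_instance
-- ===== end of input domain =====

-- B gathers all lowered assistant contents, joins them with '\n', and scans the combined
-- text once per needle, instead of A's early-return reverse walk with per-message scans
-- (objective: alternative decomposition; same results, proved equal below).

-- ===== PORT A =====
def pvNeedles : List String :=
  ["énfasis", "enfasis", "aspecto específico", "aspecto especifico", "prioridad",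
   "prioridades", "algo en lo que", "algo específico", "algo especifico"]

-- m.get("role") == "assistant"
def pvIsAsst (m : List (String × String)) : Bool :=
  PySem.Dict.get? (PySem.Dict.mk m) "role" == some "assistant"

-- (m.get("content") or "").lower()   (values are str, so `or ""` = default "")
def pvTxt (m : List (String × String)) : String :=
  PySem.Str.lower ((PySem.Dict.get? (PySem.Dict.mk m) "content").getD "")

-- the `for m in reversed(history_messages)` loop with its early return
def pvALoop : List (List (String × String)) → Bool
  | [] => false
  | m :: rest =>
    if !(pvIsAsst m) then pvALoop rest
    else if pvNeedles.any (fun n => PySem.Str.isIn n (pvTxt m)) then true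
    else pvALoop rest

def focus_question_already_asked_py (history_messages : List (List (String × String))) : Bool :=
  pvALoop history_messages.reverse

-- ===== PORT B =====
def focus_question_already_asked_py_alt (history_messages : List (List (String × String))) : Bool :=
  let texts := (history_messages.filter pvIsAsst).map pvTxt
  let combined := PySem.Str.join "\n" texts
  pvNeedles.any (fun n => PySem.Str.isIn n combined)

-- ===== PRECONDITION & SPEC =====
def Spec_focus_question_already_asked_py (history_messages : List (List (String × String))) (out : Bool) : Prop := out = focus_question_already_asked_py_alt history_messages
instance (history_messages : List (List (String × String))) (out : Bool) : Decidable (Spec_focus_question_already_asked_py history_messages out) := by unfold Spec_focus_question_already_asked_py; infer_instance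

-- ===== CLAIM (what is proved, stated in full; the proofs are below) =====
def Claim_equal_focus_question_already_asked_py : Prop := ∀ (history_messages : List (List (String × String))), Dom_focus_question_already_asked_py history_messages → Spec_focus_question_already_asked_py history_messages (focus_question_already_asked_py history_messages)

-- ===== LEMMAS AND PROOFS =====

-- every needle is nonempty and newline-free (so joining with '\n' adds no cross-boundary matches)
theorem pvNeedles_ok : ∀ n ∈ pvNeedles, n.toList ≠ [] ∧ ('\n' : Char) ∉ n.toList := by decide

-- core: a separator character absent from n splits infix-of-append into a disjunction
theorem pv_infix_append_cons_iff (c : Char) (n a b : List Char) (hc : c ∉ n) :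
    n <:+: a ++ c :: b ↔ n <:+: a ∨ n <:+: b := by
  constructor
  · rintro ⟨s, t, h⟩
    rw [List.append_assoc] at h
    rcases Nat.lt_or_ge a.length s.length with hlt | hge
    · -- n lies entirely inside b
      right
      have hdrop := congrArg (List.drop (a.length + 1)) h
      rw [List.drop_append_of_le_length (by omega)] at hdrop
      have hb : (a ++ c :: b).drop (a.length + 1) = b := by
        rw [show a ++ c :: b = (a ++ [c]) ++ b by simp, List.drop_left' (by simp)]
      rw [hb] at hdrop
      exact ⟨s.drop (a.length + 1), t, by rw [List.append_assoc]; exact hdrop⟩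
    · rcases Nat.lt_or_ge a.length (s.length + n.length) with hmid | hle
      · -- c would sit inside n: contradiction
        exfalso
        have hv := congrArg (fun l : List Char => l[a.length]?) h
        simp only at hv
        rw [List.getElem?_append_right hge, List.getElem?_append_right (le_refl _)] at hv
        simp only [Nat.sub_self, List.getElem?_cons_zero] at hv
        rw [List.getElem?_append_left (by omega)] at hv
        rw [List.getElem?_eq_getElem (by omega)] at hv
        simp only [Option.some.injEq] at hv
        have hmem : n[a.length - s.length]'(by omega) ∈ n := List.getElem_mem _
        rw [hv] at hmem
        exact hc hmem
      · -- n lies entirely inside a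
        left
        have hdrop := congrArg (List.drop s.length) h
        rw [List.drop_left, List.drop_append_of_le_length (by omega)] at hdrop
        have htake := congrArg (List.take n.length) hdrop
        rw [List.take_left, List.take_append_of_le_length (by simp; omega)] at htake
        rw [htake]
        exact ((List.take_prefix n.length (a.drop s.length)).isInfix).trans
          (List.drop_suffix s.length a).isInfix
  · rintro (⟨s, t, h⟩ | ⟨s, t, h⟩)
    · exact ⟨s, t ++ c :: b, by rw [← h]; simp⟩
    · exact ⟨a ++ c :: s, t, by rw [← h]; simp⟩

-- a nonempty, c-free n is infix of the c-join iff it is infix of some part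
theorem pv_infix_join_iff (c : Char) (n : List Char) (hn : n ≠ []) (hc : c ∉ n) :
    ∀ ts : List (List Char), (n <:+: PySem.Chars.join [c] ts ↔ ∃ t ∈ ts, n <:+: t)
  | [] => by
      simp [PySem.Chars.join, List.intercalate, hn]
  | [t] => by
      simp [PySem.Chars.join, List.intercalate]
  | t :: t' :: ts => by
      have hjoin : PySem.Chars.join [c] (t :: t' :: ts)
          = t ++ c :: PySem.Chars.join [c] (t' :: ts) := by
        simp [PySem.Chars.join, List.intercalate, List.intersperse]
      rw [hjoin, pv_infix_append_cons_iff c n _ _ hc,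
        pv_infix_join_iff c n hn hc (t' :: ts)]
      simp

theorem pvALoop_eq_any (msgs : List (List (String × String))) :
    pvALoop msgs = msgs.any (fun m => pvIsAsst m && pvNeedles.any (fun n => PySem.Str.isIn n (pvTxt m))) := by
  induction msgs with
  | nil => rfl
  | cons m rest ih =>
    rw [pvALoop, List.any_cons, ih]
    cases pvIsAsst m
    · simp
    · cases pvNeedles.any (fun n => PySem.Str.isIn n (pvTxt m)) <;> simp

theorem focus_question_already_asked_py_spec : Claim_equal_focus_question_already_asked_py := by
  intro hm _
  show focus_question_already_asked_py hm = focus_question_already_asked_py_alt hm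
  rw [Bool.eq_iff_iff]
  rw [focus_question_already_asked_py, pvALoop_eq_any, List.any_reverse]
  unfold focus_question_already_asked_py_alt
  have hsep : ("\n" : String).toList = ['\n'] := rfl
  simp only [List.any_eq_true, Bool.and_eq_true]
  constructor
  · rintro ⟨m, hmem, hrole, n, hn, hisin⟩
    refine ⟨n, hn, ?_⟩
    obtain ⟨hne, hnl⟩ := pvNeedles_ok n hn
    rw [PySem.Str.isIn_iff_infix, PySem.Str.toList_join, hsep,
      pv_infix_join_iff '\n' n.toList hne hnl]
    refine ⟨(pvTxt m).toList, ?_, (PySem.Str.isIn_iff_infix n (pvTxt m)).1 hisin⟩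
    exact List.mem_map_of_mem (List.mem_map_of_mem (List.mem_filter.2 ⟨hmem, hrole⟩))
  · rintro ⟨n, hn, hisin⟩
    obtain ⟨hne, hnl⟩ := pvNeedles_ok n hn
    rw [PySem.Str.isIn_iff_infix, PySem.Str.toList_join, hsep,
      pv_infix_join_iff '\n' n.toList hne hnl] at hisin
    obtain ⟨tl, htl, hinf⟩ := hisin
    obtain ⟨t, ht, rfl⟩ := List.mem_map.1 htl
    obtain ⟨m, hmf, rfl⟩ := List.mem_map.1 ht
    obtain ⟨hmem, hrole⟩ := List.mem_filter.1 hmf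
    exact ⟨m, hmem, hrole, n, hn, (PySem.Str.isIn_iff_infix _ _).2 hinf⟩
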